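-- pv_equiv track=rewrite | github.com/LTSHFWJT/SecEventMonitor | seceventmonitor/services/collectors/nvd.py | _pick_metric_entry
-- ===== SOURCE A (Python) =====
-- def _pick_metric_entry(entries):
--     if not entries:
--         return None
--     for entry in entries:
--         if (entry.get("type") or "").lower() == "primary":
--             return entry
--     for entry in entries:
--         if (entry.get("source") or "").lower() == "nvd@nist.gov":
--             return entry
--     return entries[0]
-- ===== SOURCE B (Python) =====
-- def _pick_metric_entry(entries):
--     if not entries:
--         return None
--
--     def score(entry):
--         if (entry.get("type") or "").lower() == "primary":
--             return 0
--         if (entry.get("source") or "").lower() == "nvd@nist.gov":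
--             return 1
--         return 2
--
--     return min(entries, key=score)
-- ===== Notes on version B (the rewrite author's own statement) =====
-- stated objective: alternative
-- what changed: Replaces A's two staged scans and head fallback by assigning each entry a priority score (0 primary, 1 nvd@nist.gov source, 2 other) and returning the stable minimum (first entry with the lowest score) via min with a key.
import Mathlib
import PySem

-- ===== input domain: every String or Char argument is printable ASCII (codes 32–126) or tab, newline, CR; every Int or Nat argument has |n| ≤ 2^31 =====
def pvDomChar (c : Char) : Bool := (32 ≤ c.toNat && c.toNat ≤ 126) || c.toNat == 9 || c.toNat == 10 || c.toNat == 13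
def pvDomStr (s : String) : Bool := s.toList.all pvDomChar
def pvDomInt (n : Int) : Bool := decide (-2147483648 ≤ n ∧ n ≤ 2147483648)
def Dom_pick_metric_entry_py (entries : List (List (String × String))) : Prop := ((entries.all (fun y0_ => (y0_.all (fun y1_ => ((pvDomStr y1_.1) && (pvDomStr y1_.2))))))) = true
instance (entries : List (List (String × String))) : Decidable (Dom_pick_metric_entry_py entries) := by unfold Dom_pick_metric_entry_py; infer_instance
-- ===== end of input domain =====

-- B replaces A's two staged scans with a priority score per entry (0 primary,
-- 1 nvd source, 2 other) and a stable minimum (objective: alternative, same cost).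

-- ===== PORT A =====
-- (entry.get("type") or "").lower() == "primary"; get returns None when missing and
-- '' or "" = "", so `.getD "type" ""` is exact (all values are strings on this domain).
def pvIsPrimary (e : List (String × String)) : Bool :=
  PySem.Str.lower ((PySem.Dict.mk e).getD "type" "") == "primary"

def pvIsNvd (e : List (String × String)) : Bool :=
  PySem.Str.lower ((PySem.Dict.mk e).getD "source" "") == "nvd@nist.gov"

-- first loop: return first primary entry; second loop: first nvd entry; else entries[0]
def pvALoop1 : List (List (String × String)) → Option (List (String × String))
  | [] => none
  | e :: rest => if pvIsPrimary e then some e else pvALoop1 rest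

def pvALoop2 : List (List (String × String)) → Option (List (String × String))
  | [] => none
  | e :: rest => if pvIsNvd e then some e else pvALoop2 rest

def pick_metric_entry_py (entries : List (List (String × String))) : Option (List (String × String)) :=
  match entries with
  | [] => none
  | e0 :: _ =>
    match pvALoop1 entries with
    | some e => some e
    | none =>
      match pvALoop2 entries with
      | some e => some e
      | none => some e0

-- ===== PORT B =====
-- score(entry): 0 for primary type, 1 for nvd source, 2 otherwise
def pvScore (e : List (String × String)) : Nat :=
  if pvIsPrimary e then 0
  else if pvIsNvd e then 1
  else 2

-- min(entries, key=score): CPython's min is this running fold keeping the FIRST minimum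
def pvMinFold : List (List (String × String)) → List (String × String) → List (String × String)
  | [], best => best
  | e :: rest, best => pvMinFold rest (if pvScore e < pvScore best then e else best)

def pick_metric_entry_py_alt (entries : List (List (String × String))) : Option (List (String × String)) :=
  match entries with
  | [] => none
  | e0 :: rest => some (pvMinFold rest e0)

-- ===== PRECONDITION & SPEC =====
def Spec_pick_metric_entry_py (entries : List (List (String × String))) (out : Option (List (String × String))) : Prop := out = pick_metric_entry_py_alt entries
instance (entries : List (List (String × String))) (out : Option (List (String × String))) : Decidable (Spec_pick_metric_entry_py entries out) := by unfold Spec_pick_metric_entry_py; infer_instance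

-- ===== CLAIM (what is proved, stated in full; the proofs are below) =====
def Claim_equal_pick_metric_entry_py : Prop := ∀ (entries : List (List (String × String))), Dom_pick_metric_entry_py entries → Spec_pick_metric_entry_py entries (pick_metric_entry_py entries)

-- ===== LEMMAS AND PROOFS =====

-- The fold's result, characterised by the current best's score: a score-0 best is final;
-- otherwise the first primary of the remainder wins, then a score-1 best, then the first
-- nvd of the remainder, then the best itself.
theorem pvMinFold_eq (l : List (List (String × String))) (b : List (String × String)) :
    pvMinFold l b =
      if pvScore b = 0 then b
      else
        match pvALoop1 l with
        | some e => e
        | none =>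
          if pvScore b = 1 then b
          else
            match pvALoop2 l with
            | some e => e
            | none => b := by
  induction l generalizing b with
  | nil => split_ifs <;> rfl
  | cons e rest ih =>
    simp only [pvMinFold, pvALoop1, pvALoop2, ih]
    by_cases hp : pvIsPrimary e <;> by_cases hn : pvIsNvd e <;>
      by_cases hbp : pvIsPrimary b <;> by_cases hbn : pvIsNvd b <;>
        simp [pvScore, hp, hn, hbp, hbn]

theorem pick_metric_entry_py_spec : Claim_equal_pick_metric_entry_py := by
  intro entries _
  unfold Spec_pick_metric_entry_py
  cases entries with
  | nil => rfl
  | cons e0 rest =>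
    simp only [pick_metric_entry_py, pick_metric_entry_py_alt]
    rw [pvMinFold_eq]
    simp only [pvALoop1, pvALoop2]
    by_cases hp : pvIsPrimary e0 <;> by_cases hn : pvIsNvd e0 <;>
      simp [pvScore, hp, hn] <;>
        (cases h1 : pvALoop1 rest <;> cases h2 : pvALoop2 rest <;> simp [h1, h2])
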